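-- pv_equiv track=rewrite | github.com/haolunc/ARC-RL | reference_solutions/solutions/dbc1a6ce.py | transform
-- ===== SOURCE A (Python) =====
-- def transform(grid):
--
--     h = len(grid)
--     w = len(grid[0]) if h else 0
--
--     out = [row[:] for row in grid]
--
--     for r in range(h):
--         cols = [c for c in range(w) if grid[r][c] == 1]
--         if len(cols) >= 2:
--             left, right = min(cols), max(cols)
--             for c in range(left, right + 1):
--                 if out[r][c] == 0:
--                     out[r][c] = 8
--
--     for c in range(w):
--         rows = [r for r in range(h) if grid[r][c] == 1]
--         if len(rows) >= 2:
--             top, bottom = min(rows), max(rows)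
--             for r in range(top, bottom + 1):
--                 if out[r][c] == 0:
--                     out[r][c] = 8
--
--     return out
-- ===== SOURCE B (Python) =====
-- def transform(grid):
--     h = len(grid)
--     w = len(grid[0]) if h else 0
--
--     def span(ones):
--         return (ones[0], ones[-1]) if len(ones) >= 2 else None
--
--     rowspan = [span([c for c in range(w) if grid[r][c] == 1]) for r in range(h)]
--     colspan = [span([r for r in range(h) if grid[r][c] == 1]) for c in range(w)]
--
--     def within(sp, i):
--         return sp is not None and sp[0] <= i <= sp[1]
--
--     return [[8 if grid[r][c] == 0 and (within(rowspan[r], c) or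
--                                        (c < w and within(colspan[c], r)))
--              else grid[r][c]
--              for c in range(len(grid[r]))]
--             for r in range(h)]
-- ===== Notes on version B (the rewrite author's own statement) =====
-- stated objective: alternative
-- what changed: Replaces A's two interleaved in-place fill passes (rows then columns, each mutating the output between endpoints) with a precomputed span table per row/column plus one functional per-cell pass that decides each cell directly from the original grid.
import Mathlib
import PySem

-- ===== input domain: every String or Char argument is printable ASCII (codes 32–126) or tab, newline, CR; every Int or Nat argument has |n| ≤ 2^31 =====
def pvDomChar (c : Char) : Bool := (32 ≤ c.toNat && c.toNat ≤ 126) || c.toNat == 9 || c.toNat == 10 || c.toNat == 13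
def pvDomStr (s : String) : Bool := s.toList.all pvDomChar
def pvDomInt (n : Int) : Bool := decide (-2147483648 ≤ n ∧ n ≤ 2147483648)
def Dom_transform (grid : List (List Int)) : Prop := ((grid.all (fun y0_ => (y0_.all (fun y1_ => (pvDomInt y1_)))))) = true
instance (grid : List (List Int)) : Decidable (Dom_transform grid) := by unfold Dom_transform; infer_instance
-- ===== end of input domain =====

-- B replaces A's two interleaved in-place fill passes with a precomputed row/column span
-- table plus one functional per-cell pass (alternative decomposition, same asymptotic cost).

-- ===== PORT A =====
-- literal transliteration of A: copy grid, fill row spans in place, then column spans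
def transform (grid : List (List Int)) : List (List Int) :=
  let h := grid.length
  let w := if h ≠ 0 then (grid.headD []).length else 0
  let out := grid
  let out := (List.range h).foldl (fun out r =>
    let cols := (List.range w).filter (fun c => (grid.getD r []).getD c 0 == 1)
    if 2 ≤ cols.length then
      let left := (PySem.List.min? cols (fun x => x)).getD 0
      let right := (PySem.List.max? cols (fun x => x)).getD 0
      (List.range' left (right + 1 - left)).foldl (fun out c =>
        if (out.getD r []).getD c 0 == 0 then out.set r ((out.getD r []).set c 8) else out) out
    else out) out
  (List.range w).foldl (fun out c =>
    let rows := (List.range h).filter (fun r => (grid.getD r []).getD c 0 == 1)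
    if 2 ≤ rows.length then
      let top := (PySem.List.min? rows (fun x => x)).getD 0
      let bottom := (PySem.List.max? rows (fun x => x)).getD 0
      (List.range' top (bottom + 1 - top)).foldl (fun out r =>
        if (out.getD r []).getD c 0 == 0 then out.set r ((out.getD r []).set c 8) else out) out
    else out) out

-- ===== PORT B =====
def pvSpan (ones : List Nat) : Option (Nat × Nat) :=
  if 2 ≤ ones.length then some (ones.headD 0, ones.getLastD 0) else none

def pvWithin (sp : Option (Nat × Nat)) (i : Nat) : Bool :=
  match sp with
  | none => false
  | some (lo, hi) => decide (lo ≤ i) && decide (i ≤ hi)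

def transform_alt (grid : List (List Int)) : List (List Int) :=
  let h := grid.length
  let w := if h ≠ 0 then (grid.headD []).length else 0
  let rowspan := (List.range h).map (fun r =>
    pvSpan ((List.range w).filter (fun c => (grid.getD r []).getD c 0 == 1)))
  let colspan := (List.range w).map (fun c =>
    pvSpan ((List.range h).filter (fun r => (grid.getD r []).getD c 0 == 1)))
  (List.range h).map (fun r =>
    let row := grid.getD r []
    (List.range row.length).map (fun c =>
      if row.getD c 0 == 0 &&
         (pvWithin (rowspan.getD r none) c ||
          (decide (c < w) && pvWithin (colspan.getD c none) r))
      then 8 else row.getD c 0))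

-- ===== PRECONDITION & SPEC =====
-- Pre_ excludes ragged grids in which some row is shorter than the first row: Python A
-- raises IndexError there (B raises there too); on every other grid A returns normally.
def Pre_transform (grid : List (List Int)) : Prop :=
  ∀ row ∈ grid, (grid.headD []).length ≤ row.length
instance (grid : List (List Int)) : Decidable (Pre_transform grid) := by
  unfold Pre_transform; infer_instance
def pvWitness_transform : List (List Int) := [[1, 0, 1], [0, 0, 0], [1, 0, 1]]
def Spec_transform (grid : List (List Int)) (out : List (List Int)) : Prop := out = transform_alt grid
instance (grid : List (List Int)) (out : List (List Int)) : Decidable (Spec_transform grid out) := by unfold Spec_transform; infer_instance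

-- ===== CLAIM (what is proved, stated in full; the proofs are below) =====
def Claim_equal_transform : Prop := ∀ (grid : List (List Int)), Dom_transform grid → Pre_transform grid → Spec_transform grid (transform grid)

-- ===== LEMMAS AND PROOFS =====

theorem set_getD_self {α : Type} (xs : List α) (c : Nat) (d : α) :
    xs.set c (xs.getD c d) = xs := by
  by_cases h : c < xs.length
  · apply List.ext_getElem?
    intro i
    rw [List.getElem?_set]
    split
    · next he => subst he; simp [List.getD_eq_getElem?_getD, h]
    · rfl
  · exact List.set_eq_of_length_le (Nat.le_of_not_lt h)

theorem pv_mapIdx_id {α : Type} (xs : List α) : xs.mapIdx (fun _ v => v) = xs := by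
  apply List.ext_getElem <;> simp

theorem pv_mapIdx_mapIdx {α : Type} (f g : Nat → α → α) (xs : List α) :
    (xs.mapIdx f).mapIdx g = xs.mapIdx (fun i v => g i (f i v)) := by
  apply List.ext_getElem <;> simp [List.getElem_mapIdx]

theorem foldl_localize {α β : Type} (r : Nat) (d : α) (g : α → β → α) :
    ∀ (cs : List β) (xs : List α),
      cs.foldl (fun xs c => xs.set r (g (xs.getD r d) c)) xs
        = xs.set r (cs.foldl g (xs.getD r d)) := by
  intro cs
  induction cs with
  | nil => intro xs; exact (set_getD_self xs r d).symm
  | cons c cs ih =>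
    intro xs
    by_cases h : r < xs.length
    · simp only [List.foldl_cons, ih, List.set_set]
      congr 1
      simp [List.getD_eq_getElem?_getD, h]
    · have hs : ∀ a : α, xs.set r a = xs := fun a => List.set_eq_of_length_le (Nat.le_of_not_lt h)
      simp only [List.foldl_cons, hs]
      rw [ih, hs]

theorem foldl_set_nodup {α : Type} (d : α) (f : Nat → α → α) :
    ∀ (cs : List Nat), cs.Nodup → ∀ (xs : List α),
      cs.foldl (fun xs c => xs.set c (f c (xs.getD c d))) xs
        = xs.mapIdx (fun c v => if c ∈ cs then f c v else v) := by
  intro cs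
  induction cs with
  | nil => intro _ xs; simp [pv_mapIdx_id]
  | cons c cs ih =>
    intro hnd xs
    have hc : c ∉ cs := (List.nodup_cons.mp hnd).1
    simp only [List.foldl_cons]
    rw [ih (List.nodup_cons.mp hnd).2]
    apply List.ext_getElem
    · simp
    · intro i h1 h2
      simp only [List.getElem_mapIdx]
      have hlen : i < xs.length := by simpa using h2
      have hlen' : i < (xs.set c (f c (xs.getD c d))).length := by simpa using hlen
      by_cases hic : i = c
      · subst hic
        have hv : (xs.set i (f i (xs.getD i d)))[i]'hlen' = f i (xs.getD i d) := by
          simp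
        rw [hv]
        simp [hc, List.getD_eq_getElem?_getD, List.getElem?_eq_getElem hlen]
      · have hv : (xs.set c (f c (xs.getD c d)))[i]'hlen' = xs[i] := by
          have hci : c ≠ i := fun h => hic h.symm
          simp [hci]
        rw [hv]
        simp [List.mem_cons, hic]

theorem foldl_mapIdx_comm {α : Type} (S : Nat → Nat → α → α) :
    ∀ (cs : List Nat) (xs : List α),
      cs.foldl (fun xs c => xs.mapIdx (fun k v => S c k v)) xs
        = xs.mapIdx (fun k v => cs.foldl (fun v c => S c k v) v) := by
  intro cs
  induction cs with
  | nil => intro xs; simp [pv_mapIdx_id]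
  | cons c cs ih =>
    intro xs
    simp only [List.foldl_cons]
    rw [ih, pv_mapIdx_mapIdx]

theorem pv_foldl_min (t : List Nat) : ∀ x, (∀ y ∈ t, x ≤ y) → t.foldl min x = x := by
  induction t with
  | nil => intro x _; rfl
  | cons y t ih =>
    intro x hx
    simp only [List.foldl_cons]
    have h1 : x ≤ y := hx y (by simp)
    rw [Nat.min_eq_left h1]
    exact ih x (fun z hz => hx z (by simp [hz]))

theorem pv_foldl_max (t : List Nat) : ∀ x, (x :: t).Pairwise (fun a b => a ≤ b) →
    t.foldl max x = (x :: t).getLastD 0 := by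
  induction t with
  | nil => intro x _; rfl
  | cons y t ih =>
    intro x hp
    simp only [List.foldl_cons]
    have hxy : x ≤ y := (List.pairwise_cons.mp hp).1 y (by simp)
    rw [Nat.max_eq_right hxy]
    have := ih y (List.pairwise_cons.mp hp).2
    rw [this]
    rfl

theorem pv_min_eq (ones : List Nat) (hp : ones.Pairwise (fun a b => a ≤ b)) :
    (PySem.List.min? ones (fun x => x)).getD 0 = ones.headD 0 := by
  cases ones with
  | nil => simp [PySem.List.min?]
  | cons x t =>
    rw [PySem.List.min?_id_cons]
    simp only [Option.getD_some, List.headD_cons]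
    exact pv_foldl_min t x (List.pairwise_cons.mp hp).1

theorem pv_max_eq (ones : List Nat) (hp : ones.Pairwise (fun a b => a ≤ b)) :
    (PySem.List.max? ones (fun x => x)).getD 0 = ones.getLastD 0 := by
  cases ones with
  | nil => simp [PySem.List.max?]
  | cons x t =>
    rw [PySem.List.max?_id_cons]
    simp only [Option.getD_some]
    exact pv_foldl_max t x hp

theorem pv_head_le_last (ones : List Nat) (hp : ones.Pairwise (fun a b => a ≤ b))
    (hne : ones ≠ []) : ones.headD 0 ≤ ones.getLastD 0 := by
  cases ones with
  | nil => exact absurd rfl hne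
  | cons x t =>
    rw [← pv_foldl_max t x hp]
    exact (PySem.List.le_foldl_max t x).1

theorem pv_inSpan (ones : List Nat) (hp : ones.Pairwise (fun a b => a ≤ b)) (i : Nat) :
    ((2 ≤ ones.length ∧ i ∈ List.range' ((PySem.List.min? ones (fun x => x)).getD 0)
        ((PySem.List.max? ones (fun x => x)).getD 0 + 1 - (PySem.List.min? ones (fun x => x)).getD 0))
     ↔ pvWithin (pvSpan ones) i = true) := by
  rw [pv_min_eq _ hp, pv_max_eq _ hp]
  by_cases h2 : 2 ≤ ones.length
  · have hne : ones ≠ [] := by cases ones <;> simp_all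
    have hle := pv_head_le_last ones hp hne
    rw [show pvSpan ones = some (ones.headD 0, ones.getLastD 0) from by simp [pvSpan, h2]]
    simp only [pvWithin, List.mem_range'_1, h2, true_and, Bool.and_eq_true, decide_eq_true_eq]
    omega
  · simp [pvSpan, h2, pvWithin]


def pvW (grid : List (List Int)) : Nat := (grid.headD []).length
def pvOnesR (grid : List (List Int)) (r : Nat) : List Nat :=
  (List.range (pvW grid)).filter (fun c => (grid.getD r []).getD c 0 == 1)
def pvOnesC (grid : List (List Int)) (c : Nat) : List Nat :=
  (List.range grid.length).filter (fun r => (grid.getD r []).getD c 0 == 1)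
def pvFixv (v : Int) : Int := if v == 0 then 8 else v
def pvCell (grid : List (List Int)) (r c : Nat) (v : Int) : Int :=
  if v == 0 &&
     (pvWithin (pvSpan (pvOnesR grid r)) c ||
      (decide (c < pvW grid) && pvWithin (pvSpan (pvOnesC grid c)) r)) then 8 else v

def pvRngR (grid : List (List Int)) (r : Nat) : List Nat :=
  List.range' ((PySem.List.min? (pvOnesR grid r) (fun x => x)).getD 0)
    ((PySem.List.max? (pvOnesR grid r) (fun x => x)).getD 0 + 1
      - (PySem.List.min? (pvOnesR grid r) (fun x => x)).getD 0)
def pvRngC (grid : List (List Int)) (c : Nat) : List Nat :=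
  List.range' ((PySem.List.min? (pvOnesC grid c) (fun x => x)).getD 0)
    ((PySem.List.max? (pvOnesC grid c) (fun x => x)).getD 0 + 1
      - (PySem.List.min? (pvOnesC grid c) (fun x => x)).getD 0)

def pvG (grid : List (List Int)) (r : Nat) (row : List Int) : List Int :=
  if 2 ≤ (pvOnesR grid r).length then
    (pvRngR grid r).foldl (fun row c =>
      if row.getD c 0 == 0 then row.set c 8 else row) row
  else row
def pvS (grid : List (List Int)) (c r : Nat) (row : List Int) : List Int :=
  if 2 ≤ (pvOnesC grid c).length ∧ r ∈ pvRngC grid c then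
    (if row.getD c 0 == 0 then row.set c 8 else row) else row

theorem set_getElem?_self {α : Type} (xs : List α) (c : Nat) (d : α) :
    xs.set c (xs[c]?.getD d) = xs := by
  rw [← List.getD_eq_getElem?_getD]; exact set_getD_self xs c d

theorem pv_ones_pairwise (n : Nat) (p : Nat → Bool) :
    ((List.range n).filter p).Pairwise (fun a b => a ≤ b) :=
  (List.pairwise_lt_range.filter p).imp (fun h => Nat.le_of_lt h)

theorem pvW_if (grid : List (List Int)) :
    (if grid.length ≠ 0 then (grid.headD []).length else 0) = pvW grid := by
  cases grid <;> simp [pvW]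

theorem mapIdx_mem_range {α : Type} (G : Nat → α → α) (xs : List α) :
    xs.mapIdx (fun i v => if i ∈ List.range xs.length then G i v else v) = xs.mapIdx G := by
  apply List.ext_getElem
  · simp
  · intro i h1 h2
    have : i < xs.length := by simpa using h1
    simp [List.getElem_mapIdx, List.mem_range, this]

def pvRowStep (grid : List (List Int)) (w : Nat) : List (List Int) → Nat → List (List Int) :=
  fun out r =>
    let cols := (List.range w).filter (fun c => (grid.getD r []).getD c 0 == 1)
    if 2 ≤ cols.length then
      let left := (PySem.List.min? cols (fun x => x)).getD 0
      let right := (PySem.List.max? cols (fun x => x)).getD 0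
      (List.range' left (right + 1 - left)).foldl (fun out c =>
        if (out.getD r []).getD c 0 == 0 then out.set r ((out.getD r []).set c 8) else out) out
    else out

def pvColStep (grid : List (List Int)) (h : Nat) : List (List Int) → Nat → List (List Int) :=
  fun out c =>
    let rows := (List.range h).filter (fun r => (grid.getD r []).getD c 0 == 1)
    if 2 ≤ rows.length then
      let top := (PySem.List.min? rows (fun x => x)).getD 0
      let bottom := (PySem.List.max? rows (fun x => x)).getD 0
      (List.range' top (bottom + 1 - top)).foldl (fun out r =>
        if (out.getD r []).getD c 0 == 0 then out.set r ((out.getD r []).set c 8) else out) out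
    else out

theorem pv_rowpass (grid : List (List Int)) (out0 : List (List Int)) :
    (List.range out0.length).foldl (pvRowStep grid (pvW grid)) out0
      = out0.mapIdx (fun r row => pvG grid r row) := by
  have hstep : pvRowStep grid (pvW grid)
      = fun out r => out.set r (pvG grid r (out.getD r [])) := by
    funext out r
    show (if 2 ≤ (pvOnesR grid r).length then _ else out) = _
    by_cases h2 : 2 ≤ (pvOnesR grid r).length
    · rw [if_pos h2]
      have hinner : (fun (o : List (List Int)) (c : Nat) =>
            if (o.getD r []).getD c 0 == 0 then o.set r ((o.getD r []).set c 8) else o)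
          = fun o c => o.set r ((fun (row : List Int) (c : Nat) =>
              if row.getD c 0 == 0 then row.set c 8 else row) (o.getD r []) c) := by
        funext o c
        simp only [beq_iff_eq, List.getD_eq_getElem?_getD]
        by_cases hc : (o[r]?.getD ([] : List Int))[c]?.getD (0 : Int) = 0
        · simp [hc]
        · simp [hc, set_getElem?_self]
      rw [hinner, foldl_localize r ([] : List Int)
        (fun (row : List Int) (c : Nat) => if row.getD c 0 == 0 then row.set c 8 else row)]
      rw [pvG, if_pos h2]
      rfl
    · rw [if_neg h2, pvG]
      rw [if_neg h2, set_getD_self]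
  rw [hstep, foldl_set_nodup ([] : List Int) (fun r row => pvG grid r row) _ List.nodup_range,
    mapIdx_mem_range]

theorem pv_colpass (grid : List (List Int)) (mid : List (List Int)) :
    (List.range (pvW grid)).foldl (pvColStep grid grid.length) mid
      = mid.mapIdx (fun r row =>
          (List.range (pvW grid)).foldl (fun row c => pvS grid c r row) row) := by
  have hstep : pvColStep grid grid.length
      = fun out c => out.mapIdx (fun r row => pvS grid c r row) := by
    funext out c
    show (if 2 ≤ (pvOnesC grid c).length then _ else out) = _
    by_cases h2 : 2 ≤ (pvOnesC grid c).length
    · rw [if_pos h2]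
      have hinner : (fun (o : List (List Int)) (r : Nat) =>
            if (o.getD r []).getD c 0 == 0 then o.set r ((o.getD r []).set c 8) else o)
          = fun o r => o.set r ((fun (_ : Nat) (row : List Int) =>
              if row.getD c 0 == 0 then row.set c 8 else row) r (o.getD r [])) := by
        funext o r
        simp only [beq_iff_eq, List.getD_eq_getElem?_getD]
        by_cases hc : (o[r]?.getD ([] : List Int))[c]?.getD (0 : Int) = 0
        · simp [hc]
        · simp [hc, set_getElem?_self]
      rw [hinner, foldl_set_nodup ([] : List Int)
        (fun (_ : Nat) (row : List Int) => if row.getD c 0 == 0 then row.set c 8 else row)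
        _ (List.nodup_range' 1)]
      congr 1
      funext r row
      have h2' := h2
      simp only [pvOnesC] at h2'
      simp only [pvS, pvRngC, pvOnesC, h2', true_and]
    · rw [if_neg h2]
      have : (fun (r : Nat) (row : List Int) => pvS grid c r row)
          = fun _ row => row := by
        funext r row
        simp [pvS, h2]
      rw [this, pv_mapIdx_id]
  rw [hstep, foldl_mapIdx_comm]

theorem pv_G_eq (grid : List (List Int)) (r : Nat) (row : List Int) :
    pvG grid r row = row.mapIdx (fun c v =>
      if 2 ≤ (pvOnesR grid r).length ∧ c ∈ pvRngR grid r then pvFixv v else v) := by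
  by_cases h2 : 2 ≤ (pvOnesR grid r).length
  · rw [pvG, if_pos h2]
    have hstep : (fun (row : List Int) (c : Nat) =>
          if row.getD c 0 == 0 then row.set c 8 else row)
        = fun row c => row.set c ((fun (_ : Nat) (v : Int) => pvFixv v) c (row.getD c 0)) := by
      funext row c
      simp only [pvFixv, beq_iff_eq, List.getD_eq_getElem?_getD]
      by_cases hc : row[c]?.getD (0 : Int) = 0
      · simp [hc]
      · simp [hc, set_getElem?_self]
    have hnd : (pvRngR grid r).Nodup := by
      unfold pvRngR; exact List.nodup_range' 1
    rw [hstep, foldl_set_nodup (0 : Int) (fun (_ : Nat) (v : Int) => pvFixv v) _ hnd]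
    congr 1
    funext c v
    simp [h2]
  · rw [pvG, if_neg h2]
    have : (fun (c : Nat) (v : Int) =>
        if 2 ≤ (pvOnesR grid r).length ∧ c ∈ pvRngR grid r then pvFixv v else v)
        = fun _ v => v := by
      funext c v; simp [h2]
    rw [this, pv_mapIdx_id]

theorem pv_Hrow_eq (grid : List (List Int)) (r : Nat) (row : List Int) :
    (List.range (pvW grid)).foldl (fun row c => pvS grid c r row) row
      = row.mapIdx (fun c v =>
          if c < pvW grid ∧ 2 ≤ (pvOnesC grid c).length ∧ r ∈ pvRngC grid c
          then pvFixv v else v) := by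
  have hstep : (fun (row : List Int) (c : Nat) => pvS grid c r row)
      = fun row c => row.set c ((fun (c : Nat) (v : Int) =>
          if 2 ≤ (pvOnesC grid c).length ∧ r ∈ pvRngC grid c then pvFixv v else v)
          c (row.getD c 0)) := by
    funext row c
    by_cases hP : 2 ≤ (pvOnesC grid c).length ∧ r ∈ pvRngC grid c
    · simp only [pvS, if_pos hP, pvFixv, beq_iff_eq, List.getD_eq_getElem?_getD]
      by_cases hc : row[c]?.getD (0 : Int) = 0
      · simp [hc]
      · simp [hc, set_getElem?_self]
    · simp only [pvS, if_neg hP, List.getD_eq_getElem?_getD, set_getElem?_self]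
  rw [hstep, foldl_set_nodup (0 : Int) (fun (c : Nat) (v : Int) =>
    if 2 ≤ (pvOnesC grid c).length ∧ r ∈ pvRngC grid c then pvFixv v else v)
    (List.range (pvW grid)) List.nodup_range row]
  congr 1
  funext c v
  simp only [List.mem_range]
  by_cases hcw : c < pvW grid
  · simp [hcw]
  · simp [hcw]

theorem pv_cell_eq (grid : List (List Int)) (r c : Nat) (v : Int) :
    (if c < pvW grid ∧ 2 ≤ (pvOnesC grid c).length ∧ r ∈ pvRngC grid c
     then pvFixv (if 2 ≤ (pvOnesR grid r).length ∧ c ∈ pvRngR grid r then pvFixv v else v)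
     else (if 2 ≤ (pvOnesR grid r).length ∧ c ∈ pvRngR grid r then pvFixv v else v))
      = pvCell grid r c v := by
  have hR : (2 ≤ (pvOnesR grid r).length ∧ c ∈ pvRngR grid r)
      ↔ pvWithin (pvSpan (pvOnesR grid r)) c = true :=
    pv_inSpan (pvOnesR grid r) (pv_ones_pairwise _ _) c
  have hC : (2 ≤ (pvOnesC grid c).length ∧ r ∈ pvRngC grid c)
      ↔ pvWithin (pvSpan (pvOnesC grid c)) r = true :=
    pv_inSpan (pvOnesC grid c) (pv_ones_pairwise _ _) r
  by_cases hPR : 2 ≤ (pvOnesR grid r).length ∧ c ∈ pvRngR grid r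
  · have hR' := hR.mp hPR
    by_cases hPC : c < pvW grid ∧ 2 ≤ (pvOnesC grid c).length ∧ r ∈ pvRngC grid c
    · simp only [if_pos hPR, if_pos hPC, pvCell, hR', pvFixv]
      by_cases hv : v = 0 <;> simp [hv]
    · simp [hPR, hPC, pvCell, hR', pvFixv]
  · have hR' : pvWithin (pvSpan (pvOnesR grid r)) c = false := by
      cases hb : pvWithin (pvSpan (pvOnesR grid r)) c
      · rfl
      · exact absurd (hR.mpr hb) hPR
    by_cases hcw : c < pvW grid
    · by_cases hP2 : 2 ≤ (pvOnesC grid c).length ∧ r ∈ pvRngC grid c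
      · have hC' := hC.mp hP2
        simp [hPR, hcw, hP2, pvCell, hR', hC', pvFixv]
      · have hC' : pvWithin (pvSpan (pvOnesC grid c)) r = false := by
          cases hb : pvWithin (pvSpan (pvOnesC grid c)) r
          · rfl
          · exact absurd (hC.mpr hb) hP2
        simp [hPR, hcw, hP2, pvCell, hR', hC']
    · have : ¬(c < pvW grid ∧ 2 ≤ (pvOnesC grid c).length ∧ r ∈ pvRngC grid c) :=
        fun h => hcw h.1
      simp [hPR, hcw, pvCell, hR']


theorem transform_eq (grid : List (List Int)) :
    transform grid = grid.mapIdx (fun r row => row.mapIdx (fun c v => pvCell grid r c v)) := by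
  have h0 : transform grid
      = (List.range (if grid.length ≠ 0 then (grid.headD []).length else 0)).foldl
          (pvColStep grid grid.length)
          ((List.range grid.length).foldl
            (pvRowStep grid (if grid.length ≠ 0 then (grid.headD []).length else 0)) grid) := rfl
  rw [h0, pvW_if, pv_rowpass, pv_colpass, pv_mapIdx_mapIdx]
  congr 1
  funext r row
  rw [pv_G_eq, pv_Hrow_eq, pv_mapIdx_mapIdx]
  congr 1
  funext c v
  exact pv_cell_eq grid r c v


theorem transform_alt_eq (grid : List (List Int)) :
    transform_alt grid = grid.mapIdx (fun r row => row.mapIdx (fun c v => pvCell grid r c v)) := by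
  have h0 : transform_alt grid
      = (List.range grid.length).map (fun r =>
          (List.range (grid.getD r []).length).map (fun c =>
            if (grid.getD r []).getD c 0 == 0 &&
               (pvWithin (((List.range grid.length).map (fun r =>
                  pvSpan (pvOnesR grid r))).getD r none) c ||
                (decide (c < pvW grid) && pvWithin (((List.range (pvW grid)).map (fun c =>
                  pvSpan (pvOnesC grid c))).getD c none) r))
            then 8 else (grid.getD r []).getD c 0)) := by
    rw [show transform_alt grid
        = (List.range grid.length).map (fun r =>
          (List.range (grid.getD r []).length).map (fun c =>
            if (grid.getD r []).getD c 0 == 0 &&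
               (pvWithin (((List.range grid.length).map (fun r =>
                  pvSpan ((List.range (if grid.length ≠ 0 then (grid.headD []).length else 0)).filter
                    (fun c => (grid.getD r []).getD c 0 == 1)))).getD r none) c ||
                (decide (c < (if grid.length ≠ 0 then (grid.headD []).length else 0)) &&
                 pvWithin (((List.range (if grid.length ≠ 0 then (grid.headD []).length else 0)).map (fun c =>
                  pvSpan ((List.range grid.length).filter
                    (fun r => (grid.getD r []).getD c 0 == 1)))).getD c none) r))
            then 8 else (grid.getD r []).getD c 0)) from rfl, pvW_if]
    rfl
  rw [h0]
  apply List.ext_getElem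
  · simp
  · intro r h1 h2
    have hr : r < grid.length := by simpa using h1
    have hrow : grid[r]?.getD ([] : List Int) = grid[r] := by
      simp [List.getElem?_eq_getElem hr]
    simp only [List.getElem_map, List.getElem_range, List.getElem_mapIdx]
    apply List.ext_getElem
    · simp [hrow]
    · intro c hc1 hc2
      have hcl : c < grid[r].length := by simpa [hrow] using hc1
      have hv : (grid[r]?.getD ([] : List Int))[c]?.getD (0 : Int) = grid[r][c] := by
        simp [hrow, List.getElem?_eq_getElem hcl]
      have hrs : ((List.range grid.length).map (fun r => pvSpan (pvOnesR grid r)))[r]?.getD none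
          = pvSpan (pvOnesR grid r) := by
        simp [hr]
      simp only [List.getElem_map, List.getElem_range, List.getElem_mapIdx,
        List.getD_eq_getElem?_getD, hv, hrs, pvCell]
      by_cases hcw : c < pvW grid
      · have hcs : ((List.range (pvW grid)).map (fun c => pvSpan (pvOnesC grid c)))[c]?.getD none
            = pvSpan (pvOnesC grid c) := by
          simp [hcw]
        rw [hcs]
      · simp [hcw]

-- ===== VERDICT (by name: the statement is the Claim_ definition above) =====
theorem transform_spec : Claim_equal_transform := by
  intro grid _ _
  unfold Spec_transform
  rw [transform_eq, transform_alt_eq]
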